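-- pv_equiv track=rewrite | github.com/slimvince/MuseScore | tools/llm_triage/compare_triage.py | _parse_note_head
-- ===== SOURCE A (Python) =====
-- from typing import Dict, List, Optional, Set, Tuple
--
-- _NOTE_PC: Dict[str, int] = {
--     "C": 0, "D": 2, "E": 4, "F": 5, "G": 7, "A": 9, "B": 11,
-- }
--
-- def _parse_note_head(s: str) -> Optional[Tuple[str, str, int, str]]:
--     """Parse leading note name. Returns (UPPER_letter, accidentals, pc, rest)."""
--     if not s:
--         return None
--     letter = s[0].upper()
--     if letter not in _NOTE_PC:
--         return None
--     pc = _NOTE_PC[letter]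
--     i = 1
--     while i < len(s) and s[i] in ("#", "b"):
--         pc = (pc + 1) % 12 if s[i] == "#" else (pc - 1) % 12
--         i += 1
--     return letter, s[1:i], pc, s[i:]
-- ===== SOURCE B (Python) =====
-- from typing import Dict, Optional, Tuple
--
-- _NOTE_PC: Dict[str, int] = {
--     "C": 0, "D": 2, "E": 4, "F": 5, "G": 7, "A": 9, "B": 11,
-- }
--
-- def _parse_note_head(s: str) -> Optional[Tuple[str, str, int, str]]:
--     """Parse leading note name. Returns (UPPER_letter, accidentals, pc, rest)."""
--     if not s:
--         return None
--     letter = s[0].upper()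
--     if letter not in _NOTE_PC:
--         return None
--     body = s[1:]
--     rest = body.lstrip("#b")
--     acc = body[:len(body) - len(rest)]
--     pc = (_NOTE_PC[letter] + acc.count("#") - acc.count("b")) % 12
--     return letter, acc, pc, rest
-- ===== Notes on version B (the rewrite author's own statement) =====
-- stated objective: simpler
-- what changed: Replaces the char-by-char index loop that steps pc by +/-1 mod 12 per accidental with a split of the accidental run via lstrip('#b') and a closed-form pc = (base + #count('#') - #count('b')) % 12.
import Mathlib
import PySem

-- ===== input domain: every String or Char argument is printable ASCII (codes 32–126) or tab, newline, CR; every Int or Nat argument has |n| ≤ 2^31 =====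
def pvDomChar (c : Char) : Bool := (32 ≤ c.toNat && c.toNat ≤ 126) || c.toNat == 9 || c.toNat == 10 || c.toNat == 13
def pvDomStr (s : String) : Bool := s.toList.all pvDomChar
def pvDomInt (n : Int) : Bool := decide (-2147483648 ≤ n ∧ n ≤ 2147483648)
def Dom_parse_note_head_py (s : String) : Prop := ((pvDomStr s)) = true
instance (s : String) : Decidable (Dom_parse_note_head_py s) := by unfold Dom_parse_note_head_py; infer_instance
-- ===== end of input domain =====

-- B replaces A's char-by-char mod-12 stepping loop by splitting off the accidental run
-- (lstrip-style) and computing pc in closed form from the '#'/'b' counts; objective: simpler.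

-- shared module constant _NOTE_PC
def noteDict : PySem.Dict String Int :=
  PySem.Dict.mk [("C", 0), ("D", 2), ("E", 4), ("F", 5), ("G", 7), ("A", 9), ("B", 11)]

-- ===== PORT A =====
-- A's while loop: scan leading '#'/'b' chars, stepping pc by (pc±1) % 12 each step;
-- returns (final pc, the scanned prefix s[1:i], the remainder s[i:]).
def pyLoopA : Int → List Char → Int × List Char × List Char
  | pc, [] => (pc, [], [])
  | pc, c :: cs =>
    if c = '#' ∨ c = 'b' then
      let pc' := if c = '#' then PySem.Int.mod (pc + 1) 12 else PySem.Int.mod (pc - 1) 12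
      let r := pyLoopA pc' cs
      (r.1, c :: r.2.1, r.2.2)
    else (pc, [], c :: cs)

def parse_note_head_py (s : String) : Option (String × String × Int × String) :=
  match s.toList with
  | [] => none                                           -- if not s: return None
  | c :: cs =>
    let letter := PySem.Chars.upperChar c                -- s[0].upper() (one char)
    match noteDict.get? (String.ofList [letter]) with        -- letter not in _NOTE_PC → None
    | none => none
    | some pc0 =>
      let r := pyLoopA pc0 cs
      some (String.ofList [letter], String.ofList r.2.1, r.1, String.ofList r.2.2)

-- ===== PORT B =====
def parse_note_head_py_alt (s : String) : Option (String × String × Int × String) :=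
  match s.toList with
  | [] => none
  | c :: body =>
    let letter := PySem.Chars.upperChar c
    match noteDict.get? (String.ofList [letter]) with
    | none => none
    | some pc0 =>
      -- body.lstrip("#b"): drop the leading run of '#'/'b' chars (exact for this char set)
      let rest := body.dropWhile (fun ch => ch = '#' || ch = 'b')
      let acc := body.take (body.length - rest.length)   -- body[:len(body)-len(rest)]
      -- acc.count("#") / acc.count("b"): single-char substring count = char count (exact)
      let pc := PySem.Int.mod (pc0 + (acc.count '#' : Int) - (acc.count 'b' : Int)) 12
      some (String.ofList [letter], String.ofList acc, pc, String.ofList rest)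

-- ===== PRECONDITION & SPEC =====
def Spec_parse_note_head_py (s : String) (out : Option (String × String × Int × String)) : Prop := out = parse_note_head_py_alt s
instance (s : String) (out : Option (String × String × Int × String)) : Decidable (Spec_parse_note_head_py s out) := by unfold Spec_parse_note_head_py; infer_instance

-- ===== CLAIM (what is proved, stated in full; the proofs are below) =====
def Claim_equal_parse_note_head_py : Prop := ∀ (s : String), Dom_parse_note_head_py s → Spec_parse_note_head_py s (parse_note_head_py s)

-- ===== LEMMAS AND PROOFS =====

lemma noteDict_val_bounds {k : String} {v : Int} (h : noteDict.get? k = some v) :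
    0 ≤ v ∧ v < 12 := by
  have hm := PySem.Dict.mem_items_of_get?_eq_some noteDict h
  simp only [noteDict, List.mem_cons, List.not_mem_nil, or_false,
    Prod.mk.injEq] at hm
  rcases hm with ⟨_, h⟩|⟨_, h⟩|⟨_, h⟩|⟨_, h⟩|⟨_, h⟩|⟨_, h⟩|⟨_, h⟩ <;> omega

lemma pyLoopA_eq (cs : List Char) : ∀ pc0 : Int, 0 ≤ pc0 → pc0 < 12 →
    pyLoopA pc0 cs =
      (PySem.Int.mod (pc0 + ((cs.takeWhile (fun ch => ch = '#' || ch = 'b')).count '#' : Int)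
          - ((cs.takeWhile (fun ch => ch = '#' || ch = 'b')).count 'b' : Int)) 12,
       cs.takeWhile (fun ch => ch = '#' || ch = 'b'),
       cs.dropWhile (fun ch => ch = '#' || ch = 'b')) := by
  induction cs with
  | nil =>
    intro pc0 h0 h1
    simp only [pyLoopA, List.takeWhile_nil, List.dropWhile_nil, List.count_nil]
    rw [PySem.Int.mod_eq_emod_of_pos (by norm_num)]
    have h : pc0 + (0:Nat) - (0:Nat) = pc0 := by push_cast; ring
    rw [h, Int.emod_eq_of_lt h0 h1]
  | cons c cs ih =>
    intro pc0 h0 h1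
    by_cases hc : c = '#' ∨ c = 'b'
    · have hP : (c = '#' || c = 'b') = true := by
        rcases hc with h|h <;> simp [h]
      rw [List.takeWhile_cons_of_pos (by simp [hP]), List.dropWhile_cons_of_pos (by simp [hP])]
      simp only [pyLoopA, if_pos hc, List.count_cons]
      set pc' := if c = '#' then PySem.Int.mod (pc0 + 1) 12 else PySem.Int.mod (pc0 - 1) 12 with hpc'
      have hb : 0 ≤ pc' ∧ pc' < 12 := by
        rw [hpc']; split <;>
          exact ⟨PySem.Int.mod_nonneg _ (by norm_num), PySem.Int.mod_lt _ (by norm_num)⟩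
      rw [ih pc' hb.1 hb.2]
      refine Prod.ext ?_ rfl
      simp only
      rw [PySem.Int.mod_eq_emod_of_pos (by norm_num), PySem.Int.mod_eq_emod_of_pos (by norm_num)]
      rcases hc with h|h
      · subst h
        simp only [hpc', PySem.Int.mod_eq_emod_of_pos (show (0:Int) < 12 by norm_num)]
        have h1 : ('#' == '#') = true := by decide
        have h2 : ('#' == 'b') = false := by decide
        simp only [h1, h2, if_true]
        push_cast
        omega
      · subst h
        simp only [hpc', if_neg (by decide : ¬ ('b' = '#')),
          PySem.Int.mod_eq_emod_of_pos (show (0:Int) < 12 by norm_num)]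
        have h1 : ('b' == '#') = false := by decide
        have h2 : ('b' == 'b') = true := by decide
        simp only [h1, h2, if_true]
        push_cast
        omega
    · have hP : (c = '#' || c = 'b') = false := by
        simp only [Bool.or_eq_false_iff, decide_eq_false_iff_not]
        exact ⟨fun h => hc (Or.inl h), fun h => hc (Or.inr h)⟩
      rw [List.takeWhile_cons_of_neg (by simp [hP]), List.dropWhile_cons_of_neg (by simp [hP])]
      simp only [pyLoopA, if_neg hc, List.count_nil]
      rw [PySem.Int.mod_eq_emod_of_pos (by norm_num)]
      have h : pc0 + (0:Nat) - (0:Nat) = pc0 := by push_cast; ring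
      rw [h, Int.emod_eq_of_lt h0 h1]

lemma take_sub_dropWhile (cs : List Char) (P : Char → Bool) :
    cs.take (cs.length - (cs.dropWhile P).length) = cs.takeWhile P := by
  have hlen : (cs.takeWhile P).length + (cs.dropWhile P).length = cs.length := by
    rw [← List.length_append, List.takeWhile_append_dropWhile]
  have hp := List.takeWhile_prefix (p := P) (l := cs)
  rw [List.prefix_iff_eq_take] at hp
  have h : cs.length - (cs.dropWhile P).length = (cs.takeWhile P).length := by omega
  rw [h, ← hp]

-- ===== VERDICT (by name: the statement is the Claim_ definition above) =====
theorem parse_note_head_py_spec : Claim_equal_parse_note_head_py := by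
  intro s _
  unfold Spec_parse_note_head_py parse_note_head_py parse_note_head_py_alt
  cases hs : s.toList with
  | nil => rfl
  | cons c cs =>
    simp only
    cases hg : noteDict.get? (String.ofList [PySem.Chars.upperChar c]) with
    | none => rfl
    | some pc0 =>
      simp only
      obtain ⟨h0, h1⟩ := noteDict_val_bounds hg
      rw [pyLoopA_eq cs pc0 h0 h1, take_sub_dropWhile]
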